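-- pv_equiv track=rewrite | github.com/OnlyCong/Course-management-system | python/lianlu封装测试.py | ger_keylist
-- ===== SOURCE A (Python) =====
-- def ger_keylist(pp,n1,n2):
--     key=pp.keys()
--     key_list=[]
--     list1=[]
--     for i in range (n1,n2):
--         list1=list(filter(lambda x:i in x,key))
--         key_list.append(list1)
--     return key_list
-- ===== SOURCE B (Python) =====
-- def ger_keylist(pp, n1, n2):
--     idx = {}
--     for k in pp.keys():
--         for e in dict.fromkeys(k):  # distinct elements of the key, in order
--             idx.setdefault(e, []).append(k)
--     return [idx.get(i, []) for i in range(n1, n2)]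
-- ===== Notes on version B (the rewrite author's own statement) =====
-- stated objective: alternative
-- what changed: Instead of filtering all keys once per i in range(n1,n2), B builds an element-to-keys index in one pass over the keys (deduplicating elements within a key) and answers each i by a dict lookup; which is cheaper depends on the range size versus total key length.
import Mathlib
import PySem

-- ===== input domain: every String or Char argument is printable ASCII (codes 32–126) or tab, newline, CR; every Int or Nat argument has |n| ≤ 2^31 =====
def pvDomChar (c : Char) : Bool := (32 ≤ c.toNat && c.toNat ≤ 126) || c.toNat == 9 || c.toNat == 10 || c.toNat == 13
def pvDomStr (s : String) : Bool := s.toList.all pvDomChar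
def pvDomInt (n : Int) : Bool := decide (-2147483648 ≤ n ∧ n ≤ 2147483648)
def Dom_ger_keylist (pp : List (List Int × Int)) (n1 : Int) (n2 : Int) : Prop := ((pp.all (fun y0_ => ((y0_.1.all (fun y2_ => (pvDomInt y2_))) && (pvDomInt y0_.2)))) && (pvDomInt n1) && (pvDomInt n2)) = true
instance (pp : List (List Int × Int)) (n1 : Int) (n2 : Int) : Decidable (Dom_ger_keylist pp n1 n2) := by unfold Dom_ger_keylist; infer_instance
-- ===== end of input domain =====

-- B builds an element→keys index in one pass over the keys, then answers each i by a dict lookup (alternative algorithm; per-i scans of the key list disappear).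

-- ===== PORT A =====
-- key = pp.keys(); for i in range(n1,n2): key_list.append(list(filter(lambda x: i in x, key)))
def ger_keylist (pp : List (List Int × Int)) (n1 : Int) (n2 : Int) : List (List (List Int)) :=
  let key := (PySem.Dict.ofList pp).keys
  (PySem.List.pyRange n1 n2 1).foldl
    (fun key_list i => key_list ++ [key.filter (fun x => x.contains i)]) []

-- ===== PORT B =====
-- idx = {}; for k in keys: for e in dict.fromkeys(k): idx.setdefault(e, []).append(k); then [idx.get(i, []) for i in range(n1,n2)]
def ger_keylist_alt (pp : List (List Int × Int)) (n1 : Int) (n2 : Int) : List (List (List Int)) :=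
  let keys := (PySem.Dict.ofList pp).keys
  let idx : PySem.Dict Int (List (List Int)) :=
    keys.foldl
      (fun d k => (PySem.Set.ofList k).foldl (fun d e => d.modify e [] (· ++ [k])) d)
      PySem.Dict.empty
  (PySem.List.pyRange n1 n2 1).map (fun i => idx.getD i [])

-- ===== PRECONDITION & SPEC =====
def Spec_ger_keylist (pp : List (List Int × Int)) (n1 : Int) (n2 : Int) (out : List (List (List Int))) : Prop := out = ger_keylist_alt pp n1 n2
instance (pp : List (List Int × Int)) (n1 : Int) (n2 : Int) (out : List (List (List Int))) : Decidable (Spec_ger_keylist pp n1 n2 out) := by unfold Spec_ger_keylist; infer_instance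

-- ===== CLAIM (what is proved, stated in full; the proofs are below) =====
def Claim_equal_ger_keylist : Prop := ∀ (pp : List (List Int × Int)) (n1 : Int) (n2 : Int), Dom_ger_keylist pp n1 n2 → Spec_ger_keylist pp n1 n2 (ger_keylist pp n1 n2)

-- ===== LEMMAS AND PROOFS =====

-- folding 'append a singleton' is map
theorem foldl_append_singleton_eq_map {α β : Type} (g : α → β) (l : List α) (acc : List β) :
    l.foldl (fun key_list i => key_list ++ [g i]) acc = acc ++ l.map g := by
  induction l generalizing acc with
  | nil => simp
  | cons a l ih => simp [List.foldl, ih]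

-- a Nodup list filtered by (· == i) is [i] if i is a member, else []
theorem filter_beq_of_nodup (s : List Int) (hnd : s.Nodup) (i : Int) :
    s.filter (fun e => e == i) = if i ∈ s then [i] else [] := by
  induction s with
  | nil => simp
  | cons a s ih =>
    rcases List.nodup_cons.mp hnd with ⟨ha, hs⟩
    by_cases hai : a = i
    · subst hai
      have : a ∉ s := ha
      simp [List.filter, ih hs, this]
    · have : (a == i) = false := by simpa using hai
      simp [List.filter, this, ih hs, Ne.symm hai]

-- the index built by B answers exactly A's filter
theorem getD_index (keys : List (List Int)) (d : PySem.Dict Int (List (List Int))) (i : Int) :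
    (keys.foldl
      (fun d k => (PySem.Set.ofList k).foldl (fun d e => d.modify e [] (· ++ [k])) d)
      d).getD i []
    = d.getD i [] ++ keys.filter (fun x => x.contains i) := by
  induction keys generalizing d with
  | nil => simp
  | cons k keys ih =>
    simp only [List.foldl, List.filter]
    rw [ih]
    have hinner : ((PySem.Set.ofList k).foldl (fun d e => d.modify e [] (· ++ [k])) d).getD i []
        = d.getD i [] ++ (if i ∈ k then [k] else []) := by
      have hmap : (PySem.Set.ofList k).foldl (fun d e => d.modify e [] (· ++ [k])) d
          = ((PySem.Set.ofList k).map (fun e => (e, k))).foldl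
              (fun d p => d.modify p.1 [] (· ++ [p.2])) d := by
        rw [List.foldl_map]
      rw [hmap, PySem.Dict.getD_foldl_modify_append]
      rw [List.filter_map]
      have hf : (PySem.Set.ofList k).filter ((fun p => p.1 == i) ∘ fun e => (e, k))
          = (PySem.Set.ofList k).filter (fun e => e == i) := rfl
      rw [hf, filter_beq_of_nodup _ (PySem.Set.nodup_ofList k) i]
      by_cases hik : i ∈ (PySem.Set.ofList k)
      · have : i ∈ k := (PySem.Set.mem_ofList k i).mp hik
        simp [hik, this]
      · have : i ∉ k := fun h => hik ((PySem.Set.mem_ofList k i).mpr h)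
        simp [hik, this]
    rw [hinner]
    by_cases hik : i ∈ k
    · simp [hik]
    · simp [hik]

-- ===== VERDICT (by name: the statement is the Claim_ definition above) =====
theorem ger_keylist_spec : Claim_equal_ger_keylist := by
  intro pp n1 n2 _
  unfold Spec_ger_keylist ger_keylist ger_keylist_alt
  rw [foldl_append_singleton_eq_map]
  simp only [List.nil_append]
  apply List.map_congr_left
  intro i _
  rw [getD_index]
  simp
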